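-- pv_equiv track=rewrite | github.com/MaxMeta/DiscERN | discern/funcs_2.py | min_intersection_size_with_reference
-- ===== SOURCE A (Python) =====
-- from typing import List, Dict, Union, Optional, Set,Tuple, Any, Hashable
--
-- def min_intersection_size_with_reference(lists: List, reference_set: Set) -> List:
--
--     """
--     Calculates the minimum intersection size with a reference set for increasing prefixes of lists.
--
--     For each k from 1 to L (length of the shortest list), this function:
--     1. Takes the first k elements from each list in `lists`.
--     2. Converts each prefix sublist to a set.
--     3. Calculates the size of the intersection between each set and the `reference_set`.
--     4. Returns the minimum of these intersection sizes.
--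
--     Args:
--         lists: A list of lists.  The inner lists can contain any hashable items.
--         reference_set: A set.  The items in this set should be of the same type as the items in the lists.
--
--     Returns:
--         A list of integers.  The i-th element is the minimum intersection size
--         (across all input lists) when considering the first (i+1) elements of each list.
--         Returns an empty list if `lists` is empty or if any of the inner lists are empty.
--         Returns an empty list if reference_set is None.
--
--     Raises:
--         TypeError: If 'lists' is not a list or if any element of 'lists' is not a list, or if reference_set is not a set.
--
--     """
--
--
--     if not lists or reference_set is None:
--         return []
--
--     min_len = min(len(sublist) for sublist in lists)
--     if min_len == 0:
--         return []  # Handle cases with empty sublists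
--
--     min_intersection_sizes = []
--     for k in range(1, min_len + 1):
--         intersection_sizes = []
--         for sublist in lists:
--             current_set = set(sublist[:k])
--             intersection_size = len(current_set.intersection(reference_set))
--             intersection_sizes.append(intersection_size)
--         min_intersection_sizes.append(min(intersection_sizes))
--
--     return min_intersection_sizes
-- ===== SOURCE B (Python) =====
-- def min_intersection_size_with_reference(lists, reference_set):
--     # One pass per list: incremental distinct-intersection counts, then column-wise minimum.
--     if not lists or reference_set is None:
--         return []
--     min_len = min(len(sublist) for sublist in lists)
--     if min_len == 0:
--         return []
--     result = None
--     for sublist in lists: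
--         seen = set()
--         cnt = 0
--         counts = []
--         for x in sublist[:min_len]:
--             if x in reference_set and x not in seen:
--                 seen.add(x)
--                 cnt += 1
--             counts.append(cnt)
--         result = counts if result is None else [min(a, b) for a, b in zip(result, counts)]
--     return result
-- ===== Notes on version B (the rewrite author's own statement) =====
-- stated objective: faster
-- what changed: Instead of rebuilding a set of each length-k prefix for every k (three nested loops), B walks each list once keeping a running seen-set and count to get all prefix intersection sizes, then takes the column-wise minimum across lists.
import Mathlib
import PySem

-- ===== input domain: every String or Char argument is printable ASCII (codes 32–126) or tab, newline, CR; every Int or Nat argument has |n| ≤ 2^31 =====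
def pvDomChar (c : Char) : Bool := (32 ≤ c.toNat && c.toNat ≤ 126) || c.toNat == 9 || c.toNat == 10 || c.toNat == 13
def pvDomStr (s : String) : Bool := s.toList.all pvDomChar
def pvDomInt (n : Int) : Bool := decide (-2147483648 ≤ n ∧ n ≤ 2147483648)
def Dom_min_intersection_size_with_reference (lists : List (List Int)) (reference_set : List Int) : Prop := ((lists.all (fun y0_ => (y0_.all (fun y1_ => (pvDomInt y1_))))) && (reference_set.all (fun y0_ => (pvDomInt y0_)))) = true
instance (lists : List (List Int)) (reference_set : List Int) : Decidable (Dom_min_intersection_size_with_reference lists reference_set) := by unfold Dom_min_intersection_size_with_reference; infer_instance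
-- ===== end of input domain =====

-- B replaces A's per-k prefix-set rebuilding by one incremental pass per list with a running
-- seen-set, followed by a column-wise minimum; a timing run is what measures the speed.

-- ===== PORT A =====
-- literal port of A: for each k, rebuild set(sublist[:k]) and intersect with the reference set
def min_intersection_size_with_reference (lists : List (List Int)) (reference_set : List Int) : List Int :=
  if lists = [] then []
  else
    match PySem.List.min? (lists.map (fun sublist => (sublist.length : Int))) (fun x => x) with
    | none => []  -- unreachable: lists ≠ [], so min over the lengths exists
    | some min_len =>
      if min_len = 0 then []
      else
        (PySem.List.pyRange 1 (min_len + 1)).foldl (fun acc k =>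
          let sizes := lists.foldl (fun szs sublist =>
            szs ++ [((PySem.Set.inter (PySem.Set.ofList (PySem.List.slice sublist none (some k))) reference_set).length : Int)]) []
          acc ++ [((PySem.List.min? sizes (fun x => x)).getD 0)]) []  -- min of a nonempty list: getD unreachable

-- ===== PORT B =====
-- one step of B's inner loop: seen-set, running count, list of counts so far
def altStep (reference_set : List Int) (st : PySem.Set Int × Int × List Int) (x : Int) : PySem.Set Int × Int × List Int :=
  if reference_set.contains x && !(PySem.Set.contains st.1 x) then
    (PySem.Set.add st.1 x, st.2.1 + 1, st.2.2 ++ [st.2.1 + 1])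
  else (st.1, st.2.1, st.2.2 ++ [st.2.1])

-- prefix intersection-size counts of one list (B's inner loop)
def altCounts (reference_set : List Int) (min_len : Int) (sublist : List Int) : List Int :=
  ((PySem.List.slice sublist none (some min_len)).foldl (altStep reference_set)
    (PySem.Set.empty, 0, [])).2.2

def min_intersection_size_with_reference_alt (lists : List (List Int)) (reference_set : List Int) : List Int :=
  if lists = [] then []
  else
    match PySem.List.min? (lists.map (fun sublist => (sublist.length : Int))) (fun x => x) with
    | none => []  -- unreachable: lists ≠ []
    | some min_len =>
      if min_len = 0 then []
      else
        (lists.foldl (fun (result : Option (List Int)) sublist =>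
          let counts := altCounts reference_set min_len sublist
          match result with
          | none => some counts
          | some r => some (r.zipWith min counts)) none).getD []

-- ===== PRECONDITION & SPEC =====
def Spec_min_intersection_size_with_reference (lists : List (List Int)) (reference_set : List Int) (out : List Int) : Prop := out = min_intersection_size_with_reference_alt lists reference_set
instance (lists : List (List Int)) (reference_set : List Int) (out : List Int) : Decidable (Spec_min_intersection_size_with_reference lists reference_set out) := by unfold Spec_min_intersection_size_with_reference; infer_instance

-- ===== CLAIM (what is proved, stated in full; the proofs are below) =====
def Claim_equal_min_intersection_size_with_reference : Prop := ∀ (lists : List (List Int)) (reference_set : List Int), Dom_min_intersection_size_with_reference lists reference_set → Spec_min_intersection_size_with_reference lists reference_set (min_intersection_size_with_reference lists reference_set)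

-- ===== LEMMAS AND PROOFS =====

-- |set(pre) & ref| as an Int
def ginter (ref pre : List Int) : Int :=
  ((PySem.Set.inter (PySem.Set.ofList pre) ref).length : Int)

theorem inter_ofList_append (ref pre : List Int) (x : Int) :
    PySem.Set.inter (PySem.Set.ofList (pre ++ [x])) ref =
      if ref.contains x && !(PySem.Set.contains (PySem.Set.inter (PySem.Set.ofList pre) ref) x) then
        PySem.Set.inter (PySem.Set.ofList pre) ref ++ [x]
      else PySem.Set.inter (PySem.Set.ofList pre) ref := by
  have h1 : PySem.Set.ofList (pre ++ [x]) = PySem.Set.add (PySem.Set.ofList pre) x := by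
    simp [PySem.Set.ofList_eq_foldl, List.foldl_append]
  have hc : PySem.Set.contains (PySem.Set.inter (PySem.Set.ofList pre) ref) x
      = (decide (x ∈ PySem.Set.ofList pre) && decide (x ∈ ref)) := by
    simp [PySem.Set.inter, PySem.Set.contains, List.mem_filter]
  rw [h1, PySem.Set.add_eq_ite, hc]
  by_cases hx : x ∈ PySem.Set.ofList pre
  · by_cases hr : x ∈ ref
    · simp [hx, hr]
    · simp [hx, hr]
  · by_cases hr : x ∈ ref
    · simp [hx, hr, PySem.Set.inter, List.filter_append]
    · simp [hx, hr, PySem.Set.inter, List.filter_append]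

-- invariant of B's inner loop: seen = set(prefix) & ref, cnt = |seen|, counts collects the per-step sizes
theorem alt_loop (ref : List Int) (l : List Int) (pre acc₀ : List Int) :
    l.foldl (altStep ref) (PySem.Set.inter (PySem.Set.ofList pre) ref, ginter ref pre, acc₀)
      = (PySem.Set.inter (PySem.Set.ofList (pre ++ l)) ref, ginter ref (pre ++ l),
         acc₀ ++ (List.range l.length).map (fun i => ginter ref (pre ++ l.take (i+1)))) := by
  induction l generalizing pre acc₀ with
  | nil => simp
  | cons x l ih =>
    have hstep : altStep ref (PySem.Set.inter (PySem.Set.ofList pre) ref, ginter ref pre, acc₀) x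
        = (PySem.Set.inter (PySem.Set.ofList (pre ++ [x])) ref, ginter ref (pre ++ [x]),
           acc₀ ++ [ginter ref (pre ++ [x])]) := by
      unfold altStep ginter
      rw [inter_ofList_append]
      by_cases hr : x ∈ ref <;> by_cases hp : x ∈ pre <;>
        simp [hr, hp, PySem.Set.inter, List.mem_filter, PySem.Set.mem_ofList]
    rw [List.foldl_cons, hstep]
    rw [ih (pre ++ [x]) (acc₀ ++ [ginter ref (pre ++ [x])])]
    simp only [List.append_assoc, List.length_cons, List.take_succ_cons]
    rw [List.range_succ_eq_map]
    simp [List.map_map, Function.comp]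

theorem altCounts_eq (ref : List Int) (m : Int) (sub : List Int) :
    altCounts ref m sub =
      (List.range (PySem.List.slice sub none (some m)).length).map
        (fun i => ginter ref ((PySem.List.slice sub none (some m)).take (i+1))) := by
  have h0 : (PySem.Set.empty, (0 : Int), ([] : List Int))
      = (PySem.Set.inter (PySem.Set.ofList []) ref, ginter ref [], ([] : List Int)) := by
    simp [PySem.Set.empty, PySem.Set.ofList, PySem.Set.inter, ginter]
  unfold altCounts
  rw [h0, alt_loop]
  simp

theorem pyRange_add (a : Int) (n : Nat) :
    PySem.List.pyRange a (a + n) = (List.range n).map (fun (i : Nat) => a + (i : Int)) := by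
  induction n generalizing a with
  | zero => simp [PySem.List.pyRange]
  | succ n ih =>
    rw [PySem.List.pyRange_one_cons (by omega)]
    have h2 : a + ((n : Nat) + 1 : Nat) = (a + 1) + (n : Nat) := by push_cast; ring
    rw [h2, ih (a + 1), List.range_succ_eq_map]
    rw [List.map_cons, List.map_map]
    simp only [Nat.cast_zero, add_zero]
    congr 1
    exact List.map_congr_left fun i _ => by simp [Function.comp]; ring

-- B's outer loop, once the accumulator is `some`
theorem opt_fold (C : List Int → List Int) (l : List (List Int)) (r0 : List Int) :
    l.foldl (fun (res : Option (List Int)) sub =>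
        match res with
        | none => some (C sub)
        | some r => some (r.zipWith min (C sub))) (some r0)
      = some (l.foldl (fun r sub => r.zipWith min (C sub)) r0) := by
  induction l generalizing r0 with
  | nil => rfl
  | cons s l ih => simpa using ih (r0.zipWith min (C s))

-- column-wise minimum of per-list count rows = row of per-column minima
theorem colzip (L : Nat) (c : List Int → Nat → Int) (rest : List (List Int)) (h0 : Nat → Int) :
    rest.foldl (fun r sub => r.zipWith min ((List.range L).map (c sub))) ((List.range L).map h0)
      = (List.range L).map (fun i => (rest.map (fun sub => c sub i)).foldl min (h0 i)) := by
  induction rest generalizing h0 with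
  | nil => rfl
  | cons s rest ih =>
    rw [List.foldl_cons]
    have hz : ((List.range L).map h0).zipWith min ((List.range L).map (c s))
        = (List.range L).map (fun i => min (h0 i) (c s i)) := by
      simp [List.zipWith_map]
    rw [hz, ih (fun i => min (h0 i) (c s i))]
    simp

-- ===== VERDICT (by name: the statement is the Claim_ definition above) =====
theorem min_intersection_size_with_reference_spec : Claim_equal_min_intersection_size_with_reference := by
  intro lists ref _
  unfold Spec_min_intersection_size_with_reference
  unfold min_intersection_size_with_reference min_intersection_size_with_reference_alt
  by_cases hnil : lists = []
  · simp [hnil]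
  rw [if_neg hnil, if_neg hnil]
  obtain ⟨l0, rest, rfl⟩ := List.exists_cons_of_ne_nil hnil
  obtain ⟨m, hmin⟩ : ∃ m, PySem.List.min? ((l0 :: rest).map (fun sublist => (sublist.length : Int))) (fun x => x) = some m :=
    ⟨_, by rw [List.map_cons]; exact PySem.List.min?_id_cons _ _⟩
  rw [hmin]
  dsimp only
  by_cases hm0 : m = 0
  · rw [if_pos hm0, if_pos hm0]
  rw [if_neg hm0, if_neg hm0]
  have hmem := PySem.List.min?_mem hmin
  have hmle := PySem.List.min?_isMin hmin
  have hm_nonneg : 0 ≤ m := by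
    rcases List.mem_map.mp hmem with ⟨s, _, hs⟩
    omega
  have hLm : ((m.toNat : Int)) = m := Int.toNat_of_nonneg hm_nonneg
  have hle : ∀ sub ∈ (l0 :: rest), m.toNat ≤ sub.length := by
    intro sub hs
    have := hmle ((sub.length : Int)) (List.mem_map.mpr ⟨sub, hs, rfl⟩)
    omega
  have hcounts : ∀ sub ∈ (l0 :: rest), altCounts ref m sub
      = (List.range m.toNat).map (fun i => ginter ref (sub.take (i+1))) := by
    intro sub hs
    have hsl : PySem.List.slice sub none (some m) = sub.take m.toNat :=
      PySem.List.slice_to sub hm_nonneg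
    rw [altCounts_eq, hsl]
    have hlen : (sub.take m.toNat).length = m.toNat := by
      have := hle sub hs
      rw [List.length_take]
      omega
    rw [hlen]
    refine List.map_congr_left fun i hi => ?_
    have hiL : i < m.toNat := List.mem_range.mp hi
    rw [List.take_take, Nat.min_eq_left (by omega)]
  -- A side
  have hsizes : ∀ k : Int, ((l0 :: rest).foldl (fun szs sublist =>
        szs ++ [((PySem.Set.inter (PySem.Set.ofList (PySem.List.slice sublist none (some k))) ref).length : Int)]) [])
      = (l0 :: rest).map (fun sublist => ginter ref (PySem.List.slice sublist none (some k))) := by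
    intro k
    simpa [ginter] using PySem.List.foldl_append_singleton_eq_map
      (f := fun sublist => ((PySem.Set.inter (PySem.Set.ofList (PySem.List.slice sublist none (some k))) ref).length : Int))
      (l := l0 :: rest) (acc := [])
  have hrange : PySem.List.pyRange 1 (m + 1) = (List.range m.toNat).map (fun (i : Nat) => 1 + (i : Int)) := by
    have h1 : m + 1 = 1 + (m.toNat : Int) := by omega
    rw [h1, pyRange_add]
  conv_lhs =>
    rw [PySem.List.foldl_append_singleton_eq_map]
  rw [hrange, List.map_map]
  -- B side
  conv_rhs => rw [List.foldl_cons]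
  dsimp only
  conv_rhs => rw [opt_fold (C := altCounts ref m) rest (altCounts ref m l0)]
  rw [Option.getD_some]
  rw [hcounts l0 (List.mem_cons_self)]
  have hfold : List.foldl (fun r sub => List.zipWith min r (altCounts ref m sub))
        ((List.range m.toNat).map (fun i => ginter ref (l0.take (i+1)))) rest
      = List.foldl (fun r sub => List.zipWith min r
          ((List.range m.toNat).map (fun i => ginter ref (sub.take (i+1)))))
        ((List.range m.toNat).map (fun i => ginter ref (l0.take (i+1)))) rest :=
    PySem.List.foldl_congr_mem _ _ _ _ (fun acc sub hs => by
      rw [hcounts sub (List.mem_cons_of_mem _ hs)])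
  rw [hfold,
    colzip m.toNat (fun sub i => ginter ref (sub.take (i+1))) rest (fun i => ginter ref (l0.take (i+1)))]
  -- compare columns
  refine List.map_congr_left fun i hi => ?_
  have hiL : i < m.toNat := List.mem_range.mp hi
  have hk : (0 : Int) ≤ 1 + (i : Int) := by omega
  have hsl : ∀ sub : List Int, PySem.List.slice sub none (some (1 + (i : Int))) = sub.take (i+1) := by
    intro sub
    rw [PySem.List.slice_to sub hk]
    congr 1
    omega
  simp only [Function.comp_apply, hsizes, hsl, List.map_cons, PySem.List.min?_id_cons, Option.getD_some]
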